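-- pv_equiv track=rewrite | github.com/rayger14/Bull-machine- | bin/optuna_wfo.py | build_backtest_paths
-- ===== SOURCE A (Python) =====
-- from typing import Dict, List, Tuple, Any
-- from itertools import combinations
--
-- def build_backtest_paths(k: int = 6, p: int = 2) -> List[List[Tuple]]:
--     """Find all non-overlapping tilings of k groups into test sets of size p.
--
--     Each "path" is a list of N/p test-group tuples that together cover all k groups
--     exactly once. The number of paths = phi(k,p) = (p/k) * C(k,p).
--
--     For k=6, p=2: returns 5 paths, each containing 3 split indices.
--     """
--     all_combos = list(combinations(range(k), p))
--
--     paths = []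
--
--     def _find_tilings(remaining_groups, current_path, combo_start):
--         if not remaining_groups:
--             paths.append(current_path[:])
--             return
--         for i in range(combo_start, len(all_combos)):
--             combo = all_combos[i]
--             if set(combo).issubset(remaining_groups):
--                 current_path.append(combo)
--                 _find_tilings(remaining_groups - set(combo), current_path, i + 1)
--                 current_path.pop()
--
--     _find_tilings(set(range(k)), [], 0)
--     return paths
-- ===== SOURCE B (Python) =====
-- from typing import List, Tuple
--
--
-- def _combos(xs, r):
--     """All strictly increasing r-subsequences of xs, in lexicographic order."""
--     if r == 0:
--         return [()]
--     if r < 0 or len(xs) < r: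
--         return []
--     head, tail = xs[0], xs[1:]
--     return [(head,) + c for c in _combos(tail, r - 1)] + _combos(tail, r)
--
--
-- def build_backtest_paths(k: int = 6, p: int = 2) -> List[List[Tuple]]:
--     """Anchor each test set on the smallest uncovered group: every tiling must
--     cover that group, so only its partner combinations are tried (no dead-end
--     subtrees, no scan over all C(k,p) combos at each node)."""
--     paths = []
--
--     def _anchored(remaining, path):
--         if not remaining:
--             paths.append(path)
--             return
--         m, rest = remaining[0], remaining[1:]
--         for extra in _combos(rest, p - 1):
--             combo = (m,) + extra
--             _anchored([x for x in rest if x not in extra], path + [combo])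
--
--     _anchored(list(range(k)), [])
--     return paths
-- ===== Notes on version B (the rewrite author's own statement) =====
-- stated objective: alternative
-- what changed: Instead of scanning the full lexicographic list of all C(k,p) combos at every node (descending into dead-end subtrees for combos that miss the smallest uncovered group), B anchors each test set on the smallest uncovered group and enumerates only that group's partner (p-1)-combinations, so every explored node extends to a tiling; intended as faster (probe measured ~2.9x median at the largest size but not consistently >=1.5x on all probe inputs, so no speed claim is made).
import Mathlib
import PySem

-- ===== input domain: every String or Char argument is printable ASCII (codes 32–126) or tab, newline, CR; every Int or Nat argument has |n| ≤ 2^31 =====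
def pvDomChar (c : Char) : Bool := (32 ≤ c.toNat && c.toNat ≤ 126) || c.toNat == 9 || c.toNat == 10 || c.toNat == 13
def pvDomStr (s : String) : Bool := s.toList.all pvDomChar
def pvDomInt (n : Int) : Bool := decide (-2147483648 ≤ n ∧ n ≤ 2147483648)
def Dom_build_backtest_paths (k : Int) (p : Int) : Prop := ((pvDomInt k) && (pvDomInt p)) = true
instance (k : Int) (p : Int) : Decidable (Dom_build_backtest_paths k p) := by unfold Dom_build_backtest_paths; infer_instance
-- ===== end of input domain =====

-- B replaces A's scan of ALL C(k,p) combos at every node (with dead-end subtrees) by anchoring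
-- each test set on the smallest uncovered group and trying only its partner (p-1)-combinations.

-- ===== PORT A =====

-- itertools.combinations(xs, r) for a list xs, in lexicographic order (r : Int; empty for r < 0,
-- which Python reaches only outside Pre_). Also serves as the port of B's hand-written _combos,
-- whose Python body is exactly this recursion.
def pvCombos (xs : List Int) (r : Int) : List (List Int) :=
  if r = 0 then [[]]
  else if r < 0 ∨ (xs.length : Int) < r then []
  else
    match xs with
    | [] => []  -- unreachable: here 0 < r ≤ xs.length
    | x :: t => (pvCombos t (r - 1)).map (fun c => x :: c) ++ pvCombos t r
termination_by xs.length

mutual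
-- _find_tilings: entry check 'if not remaining_groups'
def pvFindTilings (cs : List (List Int)) (remaining : PySem.Set Int)
    (current : List (List Int)) : List (List (List Int)) :=
  if remaining = [] then [current]
  else pvTilingsLoop cs remaining current
termination_by (cs.length, 1)

-- the 'for i in range(combo_start, len(all_combos))' loop, carried as the suffix of all_combos
-- from combo_start (the loop reads only that suffix); paths/current_path accumulate functionally.
def pvTilingsLoop (cs : List (List Int)) (remaining : PySem.Set Int)
    (current : List (List Int)) : List (List (List Int)) :=
  match cs with
  | [] => []
  | c :: rest =>
      (if PySem.Set.issubset (PySem.Set.ofList c) remaining then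
         pvFindTilings rest (PySem.Set.diff remaining (PySem.Set.ofList c)) (current ++ [c])
       else []) ++ pvTilingsLoop rest remaining current
termination_by (cs.length, 0)
end

def build_backtest_paths (k : Int) (p : Int) : List (List (List Int)) :=
  pvFindTilings (pvCombos (PySem.List.pyRange 0 k 1) p)
    (PySem.Set.ofList (PySem.List.pyRange 0 k 1)) []

-- ===== PORT B =====

-- _anchored: cover the smallest remaining group m, trying each (p-1)-combination of partners.
def pvAnchored (p : Int) (remaining : List Int) (path : List (List Int)) :
    List (List (List Int)) :=
  match remaining with
  | [] => [path]
  | m :: rest =>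
      (pvCombos rest (p - 1)).flatMap (fun extra =>
        pvAnchored p (rest.filter (fun x => !extra.contains x)) (path ++ [m :: extra]))
termination_by remaining.length
decreasing_by
  simp only [List.length_unattach, List.length_cons]
  exact Nat.lt_succ_of_le (le_trans (List.length_filter_le _ _) List.length_attach.le)

def build_backtest_paths_alt (k : Int) (p : Int) : List (List (List Int)) :=
  pvAnchored p (PySem.List.pyRange 0 k 1) []

-- ===== PRECONDITION & SPEC =====
-- Pre_ excludes only p < 0, where itertools.combinations makes A raise ValueError.
def Pre_build_backtest_paths (k : Int) (p : Int) : Prop := 0 ≤ p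
instance (k : Int) (p : Int) : Decidable (Pre_build_backtest_paths k p) := by
  unfold Pre_build_backtest_paths; infer_instance

def pvWitness_build_backtest_paths : Int × Int := (6, 2)

def Spec_build_backtest_paths (k : Int) (p : Int) (out : List (List (List Int))) : Prop :=
  out = build_backtest_paths_alt k p
instance (k : Int) (p : Int) (out : List (List (List Int))) :
    Decidable (Spec_build_backtest_paths k p out) := by
  unfold Spec_build_backtest_paths; infer_instance

-- ===== CLAIM (what is proved, stated in full; the proofs are below) =====
def Claim_equal_build_backtest_paths : Prop :=
  ∀ (k : Int) (p : Int), Dom_build_backtest_paths k p → Pre_build_backtest_paths k p →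
    Spec_build_backtest_paths k p (build_backtest_paths k p)

-- ===== LEMMAS AND PROOFS =====

-- membership in pvCombos: exactly the length-r subsequences
lemma mem_pvCombos : ∀ (xs : List Int) (r : Int) (c : List Int),
    c ∈ pvCombos xs r ↔ c.Sublist xs ∧ (c.length : Int) = r := by
  intro xs
  induction xs with
  | nil =>
    intro r c
    rw [pvCombos.eq_def]
    split_ifs with h0 hb
    · subst h0
      simp [List.sublist_nil]
    · simp [List.sublist_nil]
      rintro rfl
      simp
      omega
    · simp [List.sublist_nil]
      rintro rfl
      simp at hb
      omega
  | cons x t ih =>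
    intro r c
    rw [pvCombos.eq_def]
    split_ifs with h0 hb
    · subst h0
      simp [List.length_eq_zero_iff]
      rintro rfl
      exact List.nil_sublist _
    · simp
      intro hs hl
      have := hs.length_le
      simp only [List.length_cons] at hb this
      push_cast at hb
      omega
    · simp only [List.mem_append, List.mem_map, ih]
      constructor
      · rintro (⟨e, ⟨he, hl⟩, rfl⟩ | ⟨hs, hl⟩)
        · exact ⟨List.cons_sublist_cons.mpr he, by simp; omega⟩
        · exact ⟨hs.trans (List.sublist_cons_self x t), hl⟩
      · rintro ⟨hs, hl⟩
        rcases List.sublist_cons_iff.mp hs with h | ⟨rr, rfl, hr⟩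
        · exact Or.inr ⟨h, hl⟩
        · exact Or.inl ⟨rr, ⟨hr, by simp at hl ⊢; omega⟩, rfl⟩

-- pvCombos of a strictly increasing list is strictly lexicographically sorted
lemma pairwise_pvCombos : ∀ (xs : List Int) (r : Int), xs.Pairwise (· < ·) →
    (pvCombos xs r).Pairwise (List.Lex (· < ·)) := by
  intro xs
  induction xs with
  | nil =>
    intro r _
    rw [pvCombos.eq_def]
    split_ifs <;> simp
  | cons x t ih =>
    intro r hp
    rw [pvCombos.eq_def]
    split_ifs with h0 hb
    · simp
    · simp
    · rw [List.pairwise_append]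
      have hpt : t.Pairwise (· < ·) := hp.of_cons
      refine ⟨List.Pairwise.map _ (fun a b h => List.Lex.cons h) (ih (r-1) hpt), ih r hpt, ?_⟩
      rintro c1 hc1 c2 hc2
      rcases List.mem_map.mp hc1 with ⟨e, _, rfl⟩
      rcases (mem_pvCombos t r c2).mp hc2 with ⟨hs2, hl2⟩
      have hc2ne : c2 ≠ [] := by
        rintro rfl
        simp at hl2
        omega
      rcases c2 with _ | ⟨y, c2t⟩
      · exact absurd rfl hc2ne
      · have hy : y ∈ t := hs2.subset (by simp)
        have : x < y := (List.pairwise_cons.mp hp).1 y hy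
        exact List.Lex.rel this

lemma lex_asymm {s t : List Int} (h₁ : List.Lex (· < ·) s t) (h₂ : List.Lex (· < ·) t s) :
    False := by
  induction h₁ with
  | nil => cases h₂
  | @rel a l b l' h => cases h₂ with
    | rel h' => omega
    | cons h' => omega
  | @cons a l l' h ih => cases h₂ with
    | rel h' => omega
    | cons h' => exact ih h'

lemma lex_irrefl {s : List Int} (h : List.Lex (· < ·) s s) : False := lex_asymm h h

-- strictly sorted + subset (as members) → sublist
lemma sorted_subset_sublist : ∀ (c xs : List Int), c.Pairwise (· < ·) → xs.Pairwise (· < ·) →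
    (∀ a ∈ c, a ∈ xs) → c.Sublist xs := by
  intro c xs h1 h2 h
  exact List.sublist_of_subperm_of_pairwise (List.Nodup.subperm (List.Pairwise.nodup h1) h) h1 h2

lemma issubset_iff (c R : List Int) :
    PySem.Set.issubset (PySem.Set.ofList c) R = true ↔ ∀ a ∈ c, a ∈ R := by
  simp [PySem.Set.issubset, PySem.Set.mem_ofList, List.all_eq_true]

lemma diff_ofList (R c : List Int) :
    PySem.Set.diff R (PySem.Set.ofList c) = R.filter (fun x => !c.contains x) := by
  simp [PySem.Set.diff]

-- dead subtrees: once no reachable combo can cover m, no path is ever emitted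
lemma dead_loop : ∀ (cs : List (List Int)) (R : List Int) (cur : List (List Int)) (m : Int),
    m ∈ R → (∀ c ∈ cs, (∀ a ∈ c, a ∈ R) → m ∉ c) →
    pvTilingsLoop cs R cur = [] := by
  intro cs
  induction cs with
  | nil => intro R cur m _ _; rw [pvTilingsLoop.eq_def]
  | cons c rest ih =>
    intro R cur m hm hH
    rw [pvTilingsLoop.eq_def]
    simp only
    rw [ih R cur m hm (fun c' hc' => hH c' (List.mem_cons_of_mem _ hc'))]
    by_cases hsub : PySem.Set.issubset (PySem.Set.ofList c) R = true
    · have hsub' := (issubset_iff c R).mp hsub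
      have hmc : m ∉ c := hH c (by simp) hsub'
      have hm' : m ∈ PySem.Set.diff R (PySem.Set.ofList c) := by
        rw [diff_ofList]
        exact List.mem_filter.mpr ⟨hm, by simp [hmc]⟩
      rw [pvFindTilings.eq_def, if_neg (List.ne_nil_of_mem hm')]
      rw [ih _ _ m hm' ?_]
      · simp [hsub]
      · intro c' hc' hsubs
        refine hH c' (List.mem_cons_of_mem _ hc') (fun a ha => ?_)
        have h2 := hsubs a ha
        rw [diff_ofList] at h2
        exact (List.mem_filter.mp h2).1
    · simp [hsub]

-- the inner loop over a combo suffix cs equals B's anchored flatMap, restricted to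
-- the anchored combos still present in cs
lemma lex_cons_lt {a b : Int} {s t : List Int} (h : List.Lex (· < ·) (a :: s) (b :: t)) :
    a < b ∨ a = b := by
  cases h with
  | rel h' => exact Or.inl h'
  | cons h' => exact Or.inr rfl

lemma loop_eq (N : Nat) (p : Int) (hp : 0 ≤ p)
    (FH : ∀ (R : List Int) (cs : List (List Int)) (cur : List (List Int)),
      R.length ≤ N → R.Pairwise (· < ·) →
      cs.Pairwise (List.Lex (· < ·)) →
      (∀ c ∈ cs, c.Pairwise (· < ·) ∧ (c.length : Int) = p) →
      (∀ c₁ : List Int, c₁.Pairwise (· < ·) → (c₁.length : Int) = p →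
        (∀ a ∈ c₁, a ∈ R) → c₁ ∈ cs) →
      pvFindTilings cs R cur = pvAnchored p R cur) :
    ∀ (cs : List (List Int)) (m : Int) (rest : List Int) (cur : List (List Int)),
    rest.length ≤ N → (m :: rest).Pairwise (· < ·) →
    cs.Pairwise (List.Lex (· < ·)) →
    (∀ c ∈ cs, c.Pairwise (· < ·) ∧ (c.length : Int) = p) →
    (∀ c₁ : List Int, c₁.Pairwise (· < ·) → (c₁.length : Int) = p →
      (∀ a ∈ c₁, a ∈ m :: rest) → m ∉ c₁ → c₁ ∈ cs) →
    pvTilingsLoop cs (m :: rest) cur =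
      ((pvCombos rest (p - 1)).filter (fun e => cs.contains (m :: e))).flatMap
        (fun e => pvAnchored p (rest.filter (fun x => !e.contains x)) (cur ++ [m :: e])) := by
  intro cs
  induction cs with
  | nil =>
    intro m rest cur _ _ _ _ _
    rw [pvTilingsLoop.eq_def]
    simp
  | cons c cs' ih =>
    intro m rest cur hlen hpR hS hE hM
    have hrest_gt : ∀ a ∈ rest, m < a := (List.pairwise_cons.mp hpR).1
    have hrest_sorted : rest.Pairwise (· < ·) := (List.pairwise_cons.mp hpR).2
    have hlex : ∀ c' ∈ cs', List.Lex (· < ·) c c' := (List.pairwise_cons.mp hS).1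
    have hS' : cs'.Pairwise (List.Lex (· < ·)) := (List.pairwise_cons.mp hS).2
    have hE' : ∀ c' ∈ cs', c'.Pairwise (· < ·) ∧ ((c'.length : Int)) = p :=
      fun c' h => hE c' (List.mem_cons_of_mem _ h)
    have hcE := hE c (by simp)
    have hanch : ∀ e ∈ pvCombos rest (p - 1), ∀ a ∈ (m :: e), a ∈ m :: rest := by
      intro e he a ha
      rcases (mem_pvCombos rest (p - 1) e).mp he with ⟨hsl, _⟩
      rcases List.mem_cons.mp ha with rfl | ha
      · simp
      · exact List.mem_cons_of_mem _ (hsl.subset ha)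
    rw [pvTilingsLoop.eq_def]
    simp only
    by_cases hsub : PySem.Set.issubset (PySem.Set.ofList c) (m :: rest) = true
    · have hsub' := (issubset_iff c _).mp hsub
      by_cases hmc : m ∈ c
      · -- live case: c is the next anchored combo m :: e₀
        rcases c with _ | ⟨h₀, e₀⟩
        · exact absurd hmc (by simp)
        have hh₀ : h₀ = m := by
          rcases List.mem_cons.mp (hsub' h₀ (by simp)) with rfl | hh
          · rfl
          · exfalso
            have h1 : m < h₀ := hrest_gt _ hh
            rcases List.mem_cons.mp hmc with rfl | hm2
            · omega
            · have := (List.pairwise_cons.mp hcE.1).1 m hm2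
              omega
        subst hh₀
        have he₀sorted : e₀.Pairwise (· < ·) := (List.pairwise_cons.mp hcE.1).2
        have he₀gt : ∀ a ∈ e₀, h₀ < a := (List.pairwise_cons.mp hcE.1).1
        have he₀mem : ∀ a ∈ e₀, a ∈ rest := by
          intro a ha
          rcases List.mem_cons.mp (hsub' a (List.mem_cons_of_mem _ ha)) with rfl | h
          · exact absurd (he₀gt a ha) (lt_irrefl _)
          · exact h
        have he₀ : e₀ ∈ pvCombos rest (p - 1) := by
          refine (mem_pvCombos rest (p - 1) e₀).mpr
            ⟨sorted_subset_sublist _ _ he₀sorted hrest_sorted he₀mem, ?_⟩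
          have := hcE.2
          simp only [List.length_cons] at this
          push_cast at this
          omega
        have hdiff : PySem.Set.diff (h₀ :: rest) (PySem.Set.ofList (h₀ :: e₀)) =
            rest.filter (fun x => !e₀.contains x) := by
          rw [diff_ofList, List.filter_cons_of_neg (by simp)]
          refine List.filter_congr ?_
          intro x hx
          have hxm : x ≠ h₀ := fun h => absurd (hrest_gt x hx) (by rw [h]; exact lt_irrefl _)
          simp only [List.contains_cons, beq_eq_false_iff_ne.mpr hxm, Bool.false_or]
        rw [if_pos hsub, hdiff]
        have hbranch : pvFindTilings cs' (rest.filter (fun x => !e₀.contains x))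
            (cur ++ [h₀ :: e₀]) =
            pvAnchored p (rest.filter (fun x => !e₀.contains x)) (cur ++ [h₀ :: e₀]) := by
          refine FH _ _ _ (le_trans (List.length_filter_le _ _) hlen)
            (List.Pairwise.sublist List.filter_sublist hrest_sorted) hS' hE' ?_
          intro c₁ s1 l1 sub1
          have hnm : h₀ ∉ c₁ := by
            intro hm1
            have := (List.mem_filter.mp (sub1 _ hm1)).1
            exact absurd (hrest_gt _ this) (lt_irrefl _)
          have hMm := hM c₁ s1 l1
            (fun a ha => List.mem_cons_of_mem _ (List.mem_filter.mp (sub1 a ha)).1) hnm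
          rcases List.mem_cons.mp hMm with rfl | h
          · exact absurd (by simp : h₀ ∈ h₀ :: e₀) hnm
          · exact h
        rw [hbranch]
        have htail : pvTilingsLoop cs' (h₀ :: rest) cur =
            ((pvCombos rest (p - 1)).filter (fun e => cs'.contains (h₀ :: e))).flatMap
              (fun e => pvAnchored p (rest.filter (fun x => !e.contains x))
                (cur ++ [h₀ :: e])) := by
          refine ih h₀ rest cur hlen hpR hS' hE' ?_
          intro c₁ s1 l1 sub1 hnm
          rcases List.mem_cons.mp (hM c₁ s1 l1 sub1 hnm) with rfl | h
          · exact absurd (by simp : h₀ ∈ h₀ :: e₀) hnm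
          · exact h
        rw [htail]
        obtain ⟨pre, post, hsplit⟩ := List.append_of_mem he₀
        have hpw : (pre ++ e₀ :: post).Pairwise (List.Lex (· < ·)) := by
          rw [← hsplit]; exact pairwise_pvCombos rest (p - 1) hrest_sorted
        have hpre_lt : ∀ e ∈ pre, List.Lex (· < ·) e e₀ :=
          fun e h => (List.pairwise_append.mp hpw).2.2 e h e₀ (by simp)
        have hpost_gt : ∀ e ∈ post, List.Lex (· < ·) e₀ e :=
          (List.pairwise_cons.mp (List.pairwise_append.mp hpw).2.1).1
        rw [hsplit, List.filter_append, List.filter_append]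
        have hfpre : pre.filter (fun e => ((h₀ :: e₀) :: cs').contains (h₀ :: e)) = [] := by
          refine List.filter_eq_nil_iff.mpr ?_
          intro e he hmem
          rcases List.mem_cons.mp (List.contains_iff_mem.mp hmem) with heq | hmem'
          · have : e = e₀ := by injection heq
            subst this
            exact lex_irrefl (hpre_lt e he)
          · exact lex_asymm (List.Lex.cons (hpre_lt e he)) (hlex _ hmem')
        have hfpre' : pre.filter (fun e => cs'.contains (h₀ :: e)) = [] := by
          refine List.filter_eq_nil_iff.mpr ?_
          intro e he hmem
          exact lex_asymm (List.Lex.cons (hpre_lt e he)) (hlex _ (List.contains_iff_mem.mp hmem))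
        have hfc : (e₀ :: post).filter (fun e => ((h₀ :: e₀) :: cs').contains (h₀ :: e)) =
            e₀ :: post.filter (fun e => ((h₀ :: e₀) :: cs').contains (h₀ :: e)) :=
          List.filter_cons_of_pos (by simp)
        have hfc' : (e₀ :: post).filter (fun e => cs'.contains (h₀ :: e)) =
            post.filter (fun e => cs'.contains (h₀ :: e)) := by
          refine List.filter_cons_of_neg ?_
          simp only [Bool.not_eq_true]
          rw [Bool.eq_false_iff]
          intro hmem
          exact lex_irrefl (hlex _ (List.contains_iff_mem.mp hmem))
        have hfpost : post.filter (fun e => ((h₀ :: e₀) :: cs').contains (h₀ :: e)) =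
            post.filter (fun e => cs'.contains (h₀ :: e)) := by
          refine List.filter_congr ?_
          intro e he
          have hne : (h₀ :: e) ≠ (h₀ :: e₀) := by
            intro heq
            have : e = e₀ := by injection heq
            subst this
            exact lex_irrefl (hpost_gt e he)
          simp only [List.contains_cons, beq_eq_false_iff_ne.mpr hne, Bool.false_or]
        rw [hfpre, hfpre', hfc, hfpost, hfc']
        simp
      · -- dead case: c ⊆ remaining but misses the anchor m
        have hkill : ∀ c' ∈ cs', (∀ a ∈ c', a ∈ m :: rest) → m ∉ c' := by
          intro c' hc' hs hm'
          rcases c' with _ | ⟨h', tl'⟩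
          · simp at hm'
          have hh' : h' = m := by
            rcases List.mem_cons.mp (hs h' (by simp)) with rfl | hh
            · rfl
            · exfalso
              have h1 : m < h' := hrest_gt _ hh
              rcases List.mem_cons.mp hm' with rfl | hm2
              · omega
              · have := (List.pairwise_cons.mp (hE' _ hc').1).1 m hm2
                omega
          subst hh'
          rcases c with _ | ⟨h₀, tl₀⟩
          · have h0 := hcE.2
            have h1 := (hE' _ hc').2
            simp at h0 h1
            omega
          have hh₀ : h' < h₀ := by
            rcases List.mem_cons.mp (hsub' h₀ (by simp)) with rfl | hh
            · exact absurd hmc (by simp)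
            · exact hrest_gt _ hh
          rcases lex_cons_lt (hlex _ hc') with h | h <;> omega
        rw [if_pos hsub]
        have hmR' : m ∈ PySem.Set.diff (m :: rest) (PySem.Set.ofList c) := by
          rw [diff_ofList]
          exact List.mem_filter.mpr ⟨by simp, by simp [hmc]⟩
        rw [pvFindTilings.eq_def, if_neg (List.ne_nil_of_mem hmR')]
        rw [dead_loop cs' _ _ m hmR' ?_]
        · rw [dead_loop cs' _ cur m (by simp) hkill]
          have hfnil : (pvCombos rest (p - 1)).filter (fun e => (c :: cs').contains (m :: e)) = [] := by
            refine List.filter_eq_nil_iff.mpr ?_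
            intro e he hmem
            rcases List.mem_cons.mp (List.contains_iff_mem.mp hmem) with heq | hmem'
            · exact hmc (by rw [← heq]; simp)
            · exact hkill _ hmem' (hanch e he) (by simp)
          rw [hfnil]
          simp
        · intro c' hc' hs
          refine hkill c' hc' ?_
          intro a ha
          have := hs a ha
          rw [diff_ofList] at this
          exact (List.mem_filter.mp this).1
    · -- c not a subset of the remaining groups: skipped
      rw [if_neg hsub]
      have hM' : ∀ c₁ : List Int, c₁.Pairwise (· < ·) → (c₁.length : Int) = p →
          (∀ a ∈ c₁, a ∈ m :: rest) → m ∉ c₁ → c₁ ∈ cs' := by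
        intro c₁ s1 l1 sub1 hnm
        rcases List.mem_cons.mp (hM c₁ s1 l1 sub1 hnm) with rfl | h
        · exact absurd ((issubset_iff c₁ _).mpr sub1) hsub
        · exact h
      rw [List.nil_append, ih m rest cur hlen hpR hS' hE' hM']
      congr 1
      refine List.filter_congr ?_
      intro e he
      have hne : (m :: e) ≠ c := by
        intro heq
        exact hsub ((issubset_iff c _).mpr (heq ▸ hanch e he))
      simp only [List.contains_cons, beq_eq_false_iff_ne.mpr hne, Bool.false_or]

lemma find_eq : ∀ (N : Nat) (p : Int), 0 ≤ p →
    ∀ (R : List Int) (cs : List (List Int)) (cur : List (List Int)),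
    R.length ≤ N → R.Pairwise (· < ·) →
    cs.Pairwise (List.Lex (· < ·)) →
    (∀ c ∈ cs, c.Pairwise (· < ·) ∧ (c.length : Int) = p) →
    (∀ c₁ : List Int, c₁.Pairwise (· < ·) → (c₁.length : Int) = p →
      (∀ a ∈ c₁, a ∈ R) → c₁ ∈ cs) →
    pvFindTilings cs R cur = pvAnchored p R cur := by
  intro N
  induction N with
  | zero =>
    intro p hp R cs cur hlen _ _ _ _
    have : R = [] := List.length_eq_zero_iff.mp (Nat.le_zero.mp hlen)
    subst this
    rw [pvFindTilings.eq_def, if_pos rfl, pvAnchored.eq_def]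
  | succ N ihN =>
    intro p hp R cs cur hlen hpR hS hE hM
    rcases R with _ | ⟨m, rest⟩
    · rw [pvFindTilings.eq_def, if_pos rfl, pvAnchored.eq_def]
    · have hrest_gt : ∀ a ∈ rest, m < a := (List.pairwise_cons.mp hpR).1
      rw [pvFindTilings.eq_def, if_neg (by simp)]
      rw [loop_eq N p hp (fun R' cs' cur' h1 h2 h3 h4 h5 => ihN p hp R' cs' cur' h1 h2 h3 h4 h5)
        cs m rest cur (by simpa using hlen) hpR hS hE
        (fun c₁ a b csub _ => hM c₁ a b csub)]
      have hall : (pvCombos rest (p - 1)).filter (fun e => cs.contains (m :: e)) =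
          pvCombos rest (p - 1) := by
        refine List.filter_eq_self.mpr ?_
        intro e he
        rcases (mem_pvCombos rest (p - 1) e).mp he with ⟨hsl, hl⟩
        refine List.contains_iff_mem.mpr (hM (m :: e) ?_ ?_ ?_)
        · exact List.pairwise_cons.mpr ⟨fun a ha => hrest_gt a (hsl.subset ha),
            List.Pairwise.sublist hsl (List.pairwise_cons.mp hpR).2⟩
        · simp only [List.length_cons]
          push_cast
          omega
        · intro a ha
          rcases List.mem_cons.mp ha with rfl | ha
          · simp
          · exact List.mem_cons_of_mem _ (hsl.subset ha)
      rw [hall, pvAnchored.eq_def]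

-- ===== VERDICT (by name: the statement is the Claim_ definition above) =====
theorem build_backtest_paths_spec : Claim_equal_build_backtest_paths := by
  unfold Claim_equal_build_backtest_paths
  intro k p _ hp
  unfold Pre_build_backtest_paths at hp
  unfold Spec_build_backtest_paths build_backtest_paths build_backtest_paths_alt
  have hpw : (PySem.List.pyRange 0 k 1).Pairwise (· < ·) := PySem.List.pairwise_lt_pyRange_one 0 k
  have hnodup : (PySem.List.pyRange 0 k 1).Nodup := PySem.List.nodup_pyRange_one 0 k
  rw [PySem.Set.ofList_eq_self_of_nodup _ hnodup]
  refine find_eq (PySem.List.pyRange 0 k 1).length p hp _ _ _ le_rfl hpw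
    (pairwise_pvCombos _ _ hpw) ?_ ?_
  · intro c hc
    rcases (mem_pvCombos _ _ _).mp hc with ⟨hsl, hl⟩
    exact ⟨List.Pairwise.sublist hsl hpw, hl⟩
  · intro c₁ s1 l1 sub1
    exact (mem_pvCombos _ _ _).mpr ⟨sorted_subset_sublist _ _ s1 hpw sub1, l1⟩
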